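-- pv_equiv track=rewrite | github.com/ericmerle3789/Collatz-Junction-Theorem | scripts/research/r48_sdl_innovator.py | enumerate_B_vectors
-- ===== SOURCE A (Python) =====
-- from math import comb, gcd, ceil, log2, sqrt, pi
-- from itertools import combinations_with_replacement
--
-- def compute_S(k):
--     """Minimal S such that 2^S > 3^k. Exact via integer comparison."""
--     S = ceil(k * log2(3))
--     three_k = 3 ** k
--     while (1 << S) <= three_k:
--         S += 1
--     while S > 0 and (1 << (S - 1)) > three_k:
--         S -= 1
--     return S
--
-- def compute_max_B(k):
--     """max_B = S - k."""
--     return compute_S(k) - k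
--
-- def enumerate_B_vectors(k, max_B=None):
--     """Generate all nondecreasing B-vectors: 0 <= B_0 <= ... <= B_{k-1} = max_B."""
--     if max_B is None:
--         max_B = compute_max_B(k)
--     if k == 1:
--         yield (max_B,)
--         return
--     for combo in combinations_with_replacement(range(max_B + 1), k - 1):
--         if combo[-1] <= max_B:
--             yield combo + (max_B,)
-- ===== SOURCE B (Python) =====
-- from math import ceil, log2
--
--
-- def compute_S(k):
--     """Minimal S such that 2^S > 3^k. Exact via integer comparison."""
--     S = ceil(k * log2(3))
--     three_k = 3 ** k
--     while (1 << S) <= three_k: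
--         S += 1
--     while S > 0 and (1 << (S - 1)) > three_k:
--         S -= 1
--     return S
--
--
-- def compute_max_B(k):
--     """max_B = S - k."""
--     return compute_S(k) - k
--
--
-- def enumerate_B_vectors(k, max_B=None):
--     """Generate all nondecreasing B-vectors: 0 <= B_0 <= ... <= B_{k-1} = max_B.
--
--     Run-length enumeration: a nondecreasing vector is determined by how many
--     copies of each value 0..max_B it contains, so recurse over the VALUES,
--     choosing for each value how many copies (a run) to emit, largest count
--     first: giving the current value all remaining slots yields a vector
--     directly, and any smaller positive count recurses on the next value;
--     values with zero copies are skipped by the while loop. Counts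
--     largest-first, values low-to-high is exactly lexicographic order.
--     """
--     if max_B is None:
--         max_B = compute_max_B(k)
--     if k == 1:
--         yield (max_B,)
--         return
--     if max_B < 0:
--         return
--
--     def rec(prefix, v, rem):
--         # prefix holds the runs of values < v; rem >= 1 slots remain before the final max_B
--         while v < max_B:
--             yield prefix + (v,) * rem + (max_B,)  # all remaining slots go to v
--             for c in range(rem - 1, 0, -1):
--                 yield from rec(prefix + (v,) * c, v + 1, rem - c)
--             v += 1  # value v gets zero copies
--         yield prefix + (max_B,) * (rem + 1)
--
--     yield from rec((), 0, k - 1)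
-- ===== Notes on version B (the rewrite author's own statement) =====
-- stated objective: alternative
-- what changed: Replaces the itertools.combinations_with_replacement scan (plus the combo[-1] <= max_B filter) with a run-length enumeration: recurse over the values 0..max_B choosing how many copies of each value to emit, largest count first (all remaining slots yields a vector directly, values with zero copies are skipped by a loop), which produces the same vectors in the same lexicographic order.
import Mathlib
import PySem

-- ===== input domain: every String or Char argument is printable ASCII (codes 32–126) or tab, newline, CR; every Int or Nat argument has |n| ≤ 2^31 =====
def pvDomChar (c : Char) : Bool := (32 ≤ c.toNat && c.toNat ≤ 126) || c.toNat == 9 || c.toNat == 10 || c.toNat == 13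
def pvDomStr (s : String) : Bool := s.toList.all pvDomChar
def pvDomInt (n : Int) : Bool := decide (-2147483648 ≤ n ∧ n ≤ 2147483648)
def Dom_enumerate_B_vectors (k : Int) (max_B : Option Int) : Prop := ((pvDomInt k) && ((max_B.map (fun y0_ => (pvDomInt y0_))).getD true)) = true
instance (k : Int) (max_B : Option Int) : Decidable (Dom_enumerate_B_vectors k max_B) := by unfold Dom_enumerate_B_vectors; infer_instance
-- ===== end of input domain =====

-- B replaces A's combinations_with_replacement scan + combo[-1] filter by a run-length
-- enumeration: recurse over the VALUES 0..max_B choosing how many copies of each to emit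
-- (largest count first), which yields the same vectors in the same lexicographic order.


-- ===== shared helpers (compute_S / compute_max_B, identical in Source A and Source B) =====
-- first while loop of compute_S: increase S while 2^S <= 3^k (fuel is an upper bound on the
-- number of iterations; it is never exhausted for the seed below)
def csUp (threeK : Int) : Int → Nat → Int
  | S, 0 => S
  | S, f + 1 => if (2 : Int) ^ S.toNat ≤ threeK then csUp threeK (S + 1) f else S

-- second while loop of compute_S: decrease S while S > 0 and 2^(S-1) > 3^k
def csDown (threeK : Int) : Int → Nat → Int
  | S, 0 => S
  | S, f + 1 => if 0 < S ∧ threeK < (2 : Int) ^ (S - 1).toNat then csDown threeK (S - 1) f else S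

-- compute_S: Python seeds S with the float ceil(k*log2(3)); the two exact integer while
-- loops then make the result the minimal S with 2^S > 3^k regardless of the seed, so the
-- seed here is the exact rational stand-in ceil(k*1585/1000) and the result is identical.
-- (Called only with k >= 1: for k < 0 Python raises in '1 << S'; k <= 0 is outside Pre_.)
def computeS (k : Int) : Int :=
  let threeK : Int := 3 ^ k.toNat
  csDown threeK (csUp threeK (PySem.Int.floordiv (k * 1585 + 999) 1000) (2 * k.toNat + 4)) (2 * k.toNat + 4)

def computeMaxB (k : Int) : Int := computeS k - k

-- 'if max_B is None: max_B = compute_max_B(k)' (identical in Source A and Source B)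
def pyMaxB (k : Int) (max_B : Option Int) : Int :=
  match max_B with | none => computeMaxB k | some v => v

-- ===== PORT A =====
-- itertools.combinations_with_replacement(pool, r) in its documented lexicographic order:
-- cwr (x :: xs) (r+1) = [x :: t | t <- cwr (x :: xs) r] ++ cwr xs (r+1)
def cwrA : List Int → Nat → List (List Int)
  | _, 0 => [[]]
  | [], _ + 1 => []
  | x :: xs, r + 1 => (cwrA (x :: xs) r).map (fun t => x :: t) ++ cwrA xs (r + 1)
  termination_by pool r => (r, pool.length)

def enumerate_B_vectors (k : Int) (max_B : Option Int) : List (List Int) :=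
  let m : Int := pyMaxB k max_B
  if k = 1 then [[m]]
  else
    (cwrA (PySem.List.pyRange 0 (m + 1) 1) (k - 1).toNat).flatMap (fun combo =>
      match PySem.List.pyGet? combo (-1) with
      | some last => if last ≤ m then [combo ++ [m]] else []
      | none => [])  -- combo[-1] raises IndexError only when k ≤ 0 (outside Pre_)

-- ===== PORT B =====
-- 'rec(prefix, v, rem)' of Source B with the prefix factored out (callers prepend their run):
-- recB m d v rem is the list of TAILS rec yields after prefix; the fuel d stands for the
-- countdown 'while v < max_B' (d = (m - v).toNat at every call, so d = 0 iff v = m and the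
-- while loop is skipped: only the final 'yield prefix + (max_B,) * (rem + 1)' remains).
-- One while iteration = the all-remaining-slots yield, then the for-loop over counts
-- c = rem-1 .. 1 (each prepending the run (v,)*c to the tails of rec at v+1), then v += 1.
def recB (m : Int) : Nat → Int → Int → List (List Int)
  | 0, _v, rem => [List.replicate (rem + 1).toNat m]
  | d + 1, v, rem =>
      (List.replicate rem.toNat v ++ [m]) ::
        ((PySem.List.pyRange (rem - 1) 0 (-1)).flatMap
            (fun c => (recB m d (v + 1) (rem - c)).map (fun t => List.replicate c.toNat v ++ t))
          ++ recB m d (v + 1) rem)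

def enumerate_B_vectors_alt (k : Int) (max_B : Option Int) : List (List Int) :=
  let m : Int := pyMaxB k max_B
  if k = 1 then [[m]]
  else if m < 0 then []
  else recB m m.toNat 0 (k - 1)

-- ===== PRECONDITION & SPEC =====
-- Pre_ excludes exactly the inputs where A raises: for k ≤ 0, A raises ValueError
-- (combinations_with_replacement with r = k-1 < 0, or '1 << S' with negative S for k < 0).
def Pre_enumerate_B_vectors (k : Int) (max_B : Option Int) : Prop := 1 ≤ k

instance (k : Int) (max_B : Option Int) : Decidable (Pre_enumerate_B_vectors k max_B) := by
  unfold Pre_enumerate_B_vectors; infer_instance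

def pvWitness_enumerate_B_vectors : Int × Option Int := (3, some 2)

def Spec_enumerate_B_vectors (k : Int) (max_B : Option Int) (out : List (List Int)) : Prop := out = enumerate_B_vectors_alt k max_B
instance (k : Int) (max_B : Option Int) (out : List (List Int)) : Decidable (Spec_enumerate_B_vectors k max_B out) := by unfold Spec_enumerate_B_vectors; infer_instance

-- ===== CLAIM (what is proved, stated in full; the proofs are below) =====
def Claim_equal_enumerate_B_vectors : Prop := ∀ (k : Int) (max_B : Option Int), Dom_enumerate_B_vectors k max_B → Pre_enumerate_B_vectors k max_B → Spec_enumerate_B_vectors k max_B (enumerate_B_vectors k max_B)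

-- ===== LEMMAS AND PROOFS =====

-- unfolding equations for cwrA
theorem cwrA_cons_succ (x : Int) (xs : List Int) (r : Nat) :
    cwrA (x :: xs) (r + 1) = (cwrA (x :: xs) r).map (fun t => x :: t) ++ cwrA xs (r + 1) := by
  rw [cwrA]

theorem cwrA_nil_succ (r : Nat) : cwrA [] (r + 1) = [] := by rw [cwrA]

-- every member of cwrA pool (r+1) is nonempty and its last element lies in pool
theorem cwrA_getLast (r : Nat) :
    ∀ (pool : List Int) (c : List Int), c ∈ cwrA pool (r + 1) →
      ∃ x, c.getLast? = some x ∧ x ∈ pool := by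
  induction r with
  | zero =>
      intro pool
      induction pool with
      | nil => intro c hc; simp [cwrA] at hc
      | cons a xs ih =>
          intro c hc
          rw [cwrA_cons_succ] at hc
          simp only [cwrA, List.map_cons, List.map_nil, List.mem_append] at hc
          rcases hc with hc | hc
          · simp at hc; subst hc; exact ⟨a, rfl, List.mem_cons_self ..⟩
          · obtain ⟨x, hx, hmem⟩ := ih c hc
            exact ⟨x, hx, List.mem_cons_of_mem _ hmem⟩
  | succ r ihr =>
      intro pool
      induction pool with
      | nil => intro c hc; simp [cwrA] at hc
      | cons a xs ih =>
          intro c hc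
          rw [cwrA_cons_succ] at hc
          rcases List.mem_append.mp hc with hc | hc
          · obtain ⟨t, ht, rfl⟩ := List.mem_map.mp hc
            obtain ⟨x, hx, hmem⟩ := ihr (a :: xs) t ht
            refine ⟨x, ?_, hmem⟩
            cases t with
            | nil => simp at hx
            | cons b t' => simpa using hx
          · obtain ⟨x, hx, hmem⟩ := ih c hc
            exact ⟨x, hx, List.mem_cons_of_mem _ hmem⟩

-- A's yield (the combo[-1] <= max_B filter is always true) is just 'append max_B'
theorem flatMap_yield_eq_map (m : Int) (r : Nat) :
    (cwrA (PySem.List.pyRange 0 (m + 1) 1) (r + 1)).flatMap (fun combo =>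
        match PySem.List.pyGet? combo (-1) with
        | some last => if last ≤ m then [combo ++ [m]] else []
        | none => []) =
      (cwrA (PySem.List.pyRange 0 (m + 1) 1) (r + 1)).map (fun c => c ++ [m]) := by
  rw [List.map_eq_flatMap]
  refine List.flatMap_congr ?_
  intro c hc
  obtain ⟨x, hx, hmem⟩ := cwrA_getLast r _ c hc
  rw [PySem.List.pyGet?_neg_one, hx]
  have hxm : x ≤ m := by
    have := (PySem.List.mem_pyRange_one).mp hmem
    omega
  simp [hxm]

-- combinations with replacement over a singleton pool: one combo, a constant run
theorem cwrA_singleton (x : Int) : ∀ r : Nat, cwrA [x] r = [List.replicate r x] := by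
  intro r
  induction r with
  | zero => simp [cwrA]
  | succ r ih => rw [cwrA_cons_succ, ih, cwrA_nil_succ]; simp [List.replicate_succ]

-- run-length characterisation of cwr: group the combos by how many copies i of the
-- head the combo does NOT take (i.e. the head's count is r - i), in lexicographic order
theorem cwrA_count (x : Int) (xs : List Int) :
    ∀ r : Nat, cwrA (x :: xs) r =
      (List.range (r + 1)).flatMap
        (fun i => (cwrA xs i).map (fun t => List.replicate (r - i) x ++ t)) := by
  intro r
  induction r with
  | zero => simp [cwrA]
  | succ r ih =>
      rw [cwrA_cons_succ, ih, List.range_succ (n := r + 1), List.flatMap_append]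
      simp only [List.flatMap_cons, List.flatMap_nil, List.append_nil, Nat.sub_self,
        List.replicate_zero, List.nil_append, List.map_id_fun', List.map_flatMap,
        List.map_map]
      congr 1
      refine List.flatMap_congr ?_
      intro i hi
      have hir : i ≤ r := by simpa using Nat.lt_succ_iff.mp (List.mem_range.mp hi)
      refine List.map_congr_left fun t _ => ?_
      show x :: (List.replicate (r - i) x ++ t) = List.replicate (r + 1 - i) x ++ t
      have : r + 1 - i = (r - i) + 1 := by omega
      rw [this, List.replicate_succ, List.cons_append]

-- the grouping split as B's recursion produces it: all slots to the head first,
-- then head counts R' .. 1 (indices k = 0 .. R'-1), then head count 0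
theorem cwrA_count_split (v : Int) (xs : List Int) (R' : Nat) :
    cwrA (v :: xs) (R' + 1) =
      (List.replicate (R' + 1) v) ::
        ((List.range R').flatMap
            (fun k => (cwrA xs (k + 1)).map (fun t => List.replicate (R' - k) v ++ t))
          ++ cwrA xs (R' + 1)) := by
  rw [cwrA_count, List.range_succ_eq_map, List.flatMap_cons, List.range_succ,
    List.map_append, List.flatMap_append]
  simp only [List.flatMap_map, List.map_cons, List.map_nil, List.flatMap_cons,
    List.flatMap_nil, List.append_nil, Nat.sub_self, Nat.sub_zero,
    List.replicate_zero, List.nil_append, List.map_id_fun']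
  simp [cwrA, Nat.succ_eq_add_one, Nat.add_sub_add_right]

-- B's recursion computes cwrA over the values [v, m] with max_B appended to each combo
theorem recB_eq (m : Int) :
    ∀ (d : Nat) (v rem : Int), v + (d : Int) = m → 1 ≤ rem →
      recB m d v rem = (cwrA (PySem.List.pyRange v (m + 1) 1) rem.toNat).map (fun c => c ++ [m]) := by
  intro d
  induction d with
  | zero =>
      intro v rem hv hrem
      have hvm : v = m := by omega
      subst hvm
      rw [recB]
      have : PySem.List.pyRange v (v + 1) 1 = [v] := PySem.List.pyRange_one_singleton v
      rw [this, cwrA_singleton]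
      have : (rem + 1).toNat = rem.toNat + 1 := by omega
      rw [this]
      simp [List.replicate_succ']
  | succ d ih =>
      intro v rem hv hrem
      have hvd : v + 1 + (d : Int) = m := by push_cast at hv; omega
      obtain ⟨R', hR'⟩ : ∃ R' : Nat, rem = (R' : Int) + 1 := ⟨(rem - 1).toNat, by omega⟩
      subst hR'
      have htonat : ((R' : Int) + 1).toNat = R' + 1 := by omega
      rw [recB, PySem.List.pyRange_one_cons (show v < m + 1 by omega), htonat,
        cwrA_count_split]
      simp only [List.map_cons, List.map_append, List.map_flatMap, List.map_map]
      congr 1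
      congr 1
      · -- the for-loop over counts c = R' .. 1 vs indices k = 0 .. R'-1
        have hrange : PySem.List.pyRange ((R' : Int) + 1 - 1) 0 (-1) =
            (List.range R').map (fun k => ((R' - k : Nat) : Int)) := by
          rw [show ((R' : Int) + 1 - 1) = (R' : Int) by ring, PySem.List.pyRange_neg_one]
          have : ((R' : Int) - 0).toNat = R' := by omega
          rw [this]
          refine List.map_congr_left fun k hk => ?_
          have := List.mem_range.mp hk
          omega
        rw [hrange, List.flatMap_map]
        refine List.flatMap_congr ?_
        intro k hk
        have hkR : k < R' := List.mem_range.mp hk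
        have e1 : (R' : Int) + 1 - ((R' - k : Nat) : Int) = ((k + 1 : Nat) : Int) := by omega
        show (recB m (d) (v + 1) ((R' : Int) + 1 - ((R' - k : Nat) : Int))).map
            (fun t => List.replicate (((R' - k : Nat) : Int)).toNat v ++ t) = _
        rw [e1, ih (v + 1) ((k + 1 : Nat) : Int) (by omega) (by omega)]
        simp only [Int.toNat_natCast, List.map_map]
        refine List.map_congr_left fun t _ => ?_
        simp [Function.comp, List.append_assoc]
      · -- value v gets zero copies: continue the while loop at v + 1
        have := ih (v + 1) ((R' : Int) + 1) (by omega) (by omega)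
        rwa [htonat] at this

-- ===== VERDICT (by name: the statement is the Claim_ definition above) =====
theorem enumerate_B_vectors_spec : Claim_equal_enumerate_B_vectors := by
  intro k max_B _ hpre
  unfold Spec_enumerate_B_vectors enumerate_B_vectors enumerate_B_vectors_alt
  have hpre' : 1 ≤ k := hpre
  by_cases hk : k = 1
  · simp [hk]
  · have hr : ∃ r : Nat, (k - 1).toNat = r + 1 := ⟨(k - 1).toNat - 1, by omega⟩
    obtain ⟨r, hr⟩ := hr
    simp only [if_neg hk, hr]
    generalize pyMaxB k max_B = m
    by_cases hneg : m < 0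
    · rw [if_pos hneg, PySem.List.pyRange_one_eq_nil (by omega), cwrA_nil_succ]
      simp
    · rw [if_neg hneg]
      have h0 : (0 : Int) + (m.toNat : Int) = m := by omega
      rw [recB_eq m m.toNat 0 (k - 1) h0 (by omega), hr, flatMap_yield_eq_map]
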